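-- pv_equiv track=rewrite | github.com/linyue0096/py2cs | 01-程式與數學/01-基礎/_code/04-關係/relationTuple1.py | is_function
-- ===== SOURCE A (Python) =====
-- def is_function(relation, domain_set):
--     # 檢查唯一性：每個輸入最多一個輸出
--     outputs_count = {}
--     for input_val, _ in relation:
--         outputs_count[input_val] = outputs_count.get(input_val, 0) + 1
--         if outputs_count[input_val] > 1:
--             return False # 找到一個輸入有多個輸出
--
--     # 檢查完全性：定義域中的每個元素都有輸出
--     for domain_element in domain_set:
--         if domain_element not in outputs_count:
--             return False # 找到一個定義域元素沒有輸出
--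
--     return True
-- ===== SOURCE B (Python) =====
-- def is_function(relation, domain_set):
--     # Sort-based: sort the inputs, a repeated input shows up as two adjacent
--     # equal elements; completeness is a plain linear subset scan (no hashing).
--     inputs = sorted(x for x, _ in relation)
--     if any(a == b for a, b in zip(inputs, inputs[1:])):
--         return False
--     return all(d in inputs for d in domain_set)
-- ===== Notes on version B (the rewrite author's own statement) =====
-- stated objective: alternative
-- what changed: Replaced A's hash-counting dict with early return by a sort-then-scan algorithm: uniqueness is an adjacent-equality scan over the sorted inputs, completeness a plain linear membership scan with no hash container at all.
import Mathlib
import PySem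

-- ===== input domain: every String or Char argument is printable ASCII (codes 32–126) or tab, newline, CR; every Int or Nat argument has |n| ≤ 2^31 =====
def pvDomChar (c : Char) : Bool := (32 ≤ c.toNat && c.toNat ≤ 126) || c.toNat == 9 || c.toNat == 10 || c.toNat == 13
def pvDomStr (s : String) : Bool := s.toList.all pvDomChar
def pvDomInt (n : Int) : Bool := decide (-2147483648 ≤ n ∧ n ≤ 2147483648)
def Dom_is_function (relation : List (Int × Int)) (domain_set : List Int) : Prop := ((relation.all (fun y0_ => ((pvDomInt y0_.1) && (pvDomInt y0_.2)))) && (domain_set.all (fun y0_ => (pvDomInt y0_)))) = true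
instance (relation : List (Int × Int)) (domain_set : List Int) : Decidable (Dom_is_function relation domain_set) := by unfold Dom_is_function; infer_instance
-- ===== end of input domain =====

-- B replaces A's hash-counting dict (with early return) by sort-then-scan:
-- duplicates become adjacent after sorting, completeness is a linear subset scan (objective: alternative).

-- ===== PORT A =====
-- first loop of A: count each input, return none (= early `return False`) if any count exceeds 1
def isfnCheckUnique : List (Int × Int) → PySem.Dict Int Int → Option (PySem.Dict Int Int)
  | [], counts => some counts
  | (input_val, _) :: rest, counts =>
    let c := counts.getD input_val 0 + 1
    let counts := counts.insert input_val c
    if c > 1 then none else isfnCheckUnique rest counts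

-- second loop of A: every domain element must be a key of outputs_count
def isfnCheckDomain : List Int → PySem.Dict Int Int → Bool
  | [], _ => true
  | d :: rest, counts => if counts.contains d then isfnCheckDomain rest counts else false

def is_function (relation : List (Int × Int)) (domain_set : List Int) : Bool :=
  match isfnCheckUnique relation PySem.Dict.empty with
  | none => false
  | some outputs_count => isfnCheckDomain domain_set outputs_count

-- ===== PORT B =====
-- zip(inputs, inputs[1:]) is inputs.zip inputs.tail (exact: the slice [1:] drops the head)
def is_function_alt (relation : List (Int × Int)) (domain_set : List Int) : Bool :=
  let inputs := PySem.List.sorted (relation.map (fun p => p.1)) (fun x => x) false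
  if (inputs.zip inputs.tail).any (fun ab => ab.1 == ab.2) then false
  else domain_set.all (fun d => inputs.contains d)

-- ===== PRECONDITION & SPEC =====
def Spec_is_function (relation : List (Int × Int)) (domain_set : List Int) (out : Bool) : Prop := out = is_function_alt relation domain_set
instance (relation : List (Int × Int)) (domain_set : List Int) (out : Bool) : Decidable (Spec_is_function relation domain_set out) := by unfold Spec_is_function; infer_instance

-- ===== CLAIM (what is proved, stated in full; the proofs are below) =====
def Claim_equal_is_function : Prop := ∀ (relation : List (Int × Int)) (domain_set : List Int), Dom_is_function relation domain_set → Spec_is_function relation domain_set (is_function relation domain_set)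

-- ===== LEMMAS AND PROOFS =====

-- A's first loop: succeeds iff the inputs are duplicate-free, leaving each input mapped to 1
theorem pv_checkUnique_spec (rel : List (Int × Int)) (counts : PySem.Dict Int Int)
    (hinv : ∀ x, counts.get? x = none ∨ counts.get? x = some 1) :
    isfnCheckUnique rel counts =
      if (rel.map Prod.fst).Nodup ∧ ∀ x ∈ rel.map Prod.fst, counts.contains x = false
      then some ((rel.map Prod.fst).foldl (fun d x => d.insert x 1) counts) else none := by
  induction rel generalizing counts with
  | nil => simp [isfnCheckUnique]
  | cons p rest ih =>
    obtain ⟨a, b⟩ := p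
    simp only [isfnCheckUnique]
    rcases hinv a with ha | ha
    · have hgd : counts.getD a 0 = 0 := by simp [PySem.Dict.getD, ha]
      have hca : counts.contains a = false := by
        rw [PySem.Dict.contains_eq_isSome_get?, ha]; rfl
      rw [hgd]
      have hinv' : ∀ x, (counts.insert a 1).get? x = none ∨ (counts.insert a 1).get? x = some 1 := by
        intro x
        rw [PySem.Dict.get?_insert]
        split
        · exact Or.inr rfl
        · exact hinv x
      rw [show (0:Int) + 1 = 1 by norm_num, if_neg (show ¬((1:Int) > 1) by omega), ih _ hinv']
      have hcond : ((rest.map Prod.fst).Nodup ∧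
            ∀ x ∈ rest.map Prod.fst, (counts.insert a 1).contains x = false)
          ↔ (((a, b) :: rest).map Prod.fst).Nodup ∧
            ∀ x ∈ ((a, b) :: rest).map Prod.fst, counts.contains x = false := by
        simp only [PySem.Dict.contains_insert, List.map_cons, List.nodup_cons,
          List.mem_cons, Bool.or_eq_false_iff, beq_eq_false_iff_ne, ne_eq]
        constructor
        · rintro ⟨hn, hall⟩
          exact ⟨⟨fun hm => (hall a hm).1 rfl, hn⟩,
            fun x hx => hx.elim (fun h => h ▸ hca) (fun h => (hall x h).2)⟩
        · rintro ⟨⟨hna, hn⟩, hall⟩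
          exact ⟨hn, fun x hx => ⟨fun h => hna (h ▸ hx), hall x (Or.inr hx)⟩⟩
      rw [if_congr hcond rfl rfl]
      simp [List.foldl_cons]
    · have hgd : counts.getD a 0 = 1 := by simp [PySem.Dict.getD, ha]
      have hca : counts.contains a = true := by
        rw [PySem.Dict.contains_eq_isSome_get?, ha]; rfl
      rw [hgd]
      rw [if_pos (show (1:Int) + 1 > 1 by omega)]
      have : ¬((((a, b) :: rest).map Prod.fst).Nodup ∧
          ∀ x ∈ ((a, b) :: rest).map Prod.fst, counts.contains x = false) := by
        rintro ⟨-, hall⟩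
        have := hall a (by simp)
        rw [hca] at this
        simp at this
      rw [if_neg this]

theorem pv_checkDomain_eq (ds : List Int) (counts : PySem.Dict Int Int) :
    isfnCheckDomain ds counts = ds.all (fun d => counts.contains d) := by
  induction ds with
  | nil => rfl
  | cons d rest ih =>
    simp only [isfnCheckDomain, List.all_cons, ih]
    cases h : counts.contains d
    · simp only [Bool.false_and, Bool.false_eq_true, if_false]
    · simp only [Bool.true_and, if_true]

theorem pv_final_contains (inputs : List Int) (d : Int) :
    (inputs.foldl (fun (dd : PySem.Dict Int Int) x => dd.insert x 1) PySem.Dict.empty).contains d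
      = decide (d ∈ inputs) := by
  have hk := PySem.Dict.keys_foldl_insert inputs (fun _ _ => (1 : Int)) PySem.Dict.empty
  rw [PySem.Dict.contains_eq_decide_mem_keys, hk, PySem.Dict.keys_empty,
    PySem.Set.update_nil_left]
  simp [PySem.Set.mem_ofList]

-- B's adjacency scan on a ≤-sorted list detects exactly the duplicates
theorem pv_adj_scan (s : List Int) (hs : s.Pairwise (· ≤ ·)) :
    (s.zip s.tail).any (fun ab => ab.1 == ab.2) = !decide s.Nodup := by
  induction s with
  | nil => simp
  | cons a s ih =>
    cases s with
    | nil => simp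
    | cons b t =>
      have hpw : (b :: t).Pairwise (· ≤ ·) := hs.tail
      have hab : a ≤ b := (List.pairwise_cons.1 hs).1 b (by simp)
      by_cases h : a = b
      · subst h
        simp [List.zip, List.any_cons]
      · have hnot : a ∉ b :: t := by
          intro hm
          rcases List.mem_cons.1 hm with h' | h'
          · exact h h'
          · have hbx : b ≤ a := (List.pairwise_cons.1 hpw).1 a h'
            exact h (le_antisymm hab hbx)
        have : ((a :: b :: t).zip (b :: t)).any (fun ab => ab.1 == ab.2)
            = ((b :: t).zip t).any (fun ab => ab.1 == ab.2) := by
          simp [List.zip, List.any_cons, h]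
        have ihe := ih hpw
        simp only [List.tail_cons] at ihe
        simp only [List.tail_cons]
        rw [this, ihe]
        simp [List.nodup_cons, hnot]

-- ===== VERDICT (by name: the statement is the Claim_ definition above) =====
theorem is_function_spec : Claim_equal_is_function := by
  intro rel ds _
  unfold Spec_is_function is_function is_function_alt
  rw [pv_checkUnique_spec rel PySem.Dict.empty (fun x => Or.inl (PySem.Dict.get?_empty x))]
  simp only [PySem.Dict.contains_empty, implies_true, and_true]
  set xs := rel.map (fun p => p.1) with hxs
  set s := PySem.List.sorted xs (fun x => x) false with hsdef
  have hperm : s.Perm xs := PySem.List.sorted_perm xs (fun x => x) false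
  have hsorted : s.Pairwise (· ≤ ·) := by
    have := PySem.List.sorted_pairwise xs (fun x => x)
    simpa using this
  rw [pv_adj_scan s hsorted]
  have hnd : s.Nodup ↔ xs.Nodup := hperm.nodup_iff
  by_cases h : xs.Nodup
  · rw [if_pos h]
    have : (!decide s.Nodup) = false := by simp [hnd.2 h]
    rw [this, if_neg (by simp)]
    have hmt : (match some (List.foldl (fun (d : PySem.Dict Int Int) x => d.insert x 1) PySem.Dict.empty xs) with
        | none => false
        | some outputs_count => isfnCheckDomain ds outputs_count)
        = isfnCheckDomain ds (List.foldl (fun d x => d.insert x 1) PySem.Dict.empty xs) := rfl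
    rw [hmt, pv_checkDomain_eq]
    refine congrArg ds.all (funext fun d => ?_)
    rw [pv_final_contains]
    simp [List.contains_eq_mem, hperm.mem_iff]
  · rw [if_neg h]
    have : (!decide s.Nodup) = true := by
      simp
      exact fun hh => h (hnd.1 hh)
    rw [this, if_pos rfl]
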